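-- pv_equiv track=rewrite | github.com/radical-cybertools/radical.utils | src/radical/utils/host.py | compress_hostlist
-- ===== SOURCE A (Python) =====
-- def compress_hostlist(nodes):
--     '''
--     Assume that a batch allocation has these nodes:
--
--        nodes = ['node01', 'node02', 'node03', 'node04',
--                 'node15', 'node17', 'node18']
--
--     then the nodelist is compressed to:
--
--        nodelist = 'node[01-04,15,17-18]'
--
--     NOTE: not support yet for further packing like:
--
--        nodelist = 'node0[1-4],node1[5,7-8]'
--     '''
--
--     if not nodes:
--         return ''
--
--     nodes  = sorted(nodes)
--     prefix = ''
--     for char in nodes[0]: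
--         if char.isdigit():
--             break
--         prefix += char
--
--     plen = len(prefix)
--
--     for node in nodes:
--
--         if not node.startswith(prefix):
--             raise ValueError('nodes do not have the same prefix: %s' % nodes)
--
--         if not node[len(prefix):].isdigit():
--             raise ValueError('nodes do not have numeric suffix: %s' % nodes)
--
--     if len(nodes) == 1:
--         return nodes[0]
--
--     ranges = list()
--     start  = None
--     end    = None
--
--     for node in nodes:
--
--         node_idx  = int(node[plen:])
--         start_idx = int(start[plen:]) if start else None
--         end_idx   = int(end[plen:])   if end   else None
--
--         if not start:
--             start = node
--             continue
--
--         if not end: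
--             # if we have no end yet, check if we have a consecutive node and
--             # mark the new end
--             if node_idx == start_idx + 1:
--                 end = node
--                 continue
--
--             else:
--                 # store the previous node and start a new range
--                 ranges.append('%s' % start[plen:])
--                 start = node
--
--         else:
--             # if we have an end, check if we have a consecutive node and move
--             # the end
--             if node_idx == end_idx + 1:
--                 end = node
--                 continue
--
--             else:
--                 # otherwise, store the previous range and start a new one
--                 ranges.append('%s-%s' % (start[plen:], end[plen:]))
--                 start = node
--                 end   = None
--
--     # if we have a start but no end, we need to store the last node
--     # if we have an end, we need to store the last range
--     if start:
--         if end: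
--             ranges.append('%s-%s' % (start[plen:], end[plen:]))
--         else:
--             ranges.append('%s' % start[plen:])
--
--     new = '%s[%s]' % (prefix, ','.join(ranges))
--
--     return new
-- ===== SOURCE B (Python) =====
-- def compress_hostlist(nodes):
--
--     if not nodes:
--         return ''
--
--     nodes = sorted(nodes)
--
--     prefix = ''
--     for char in nodes[0]:
--         if char.isdigit():
--             break
--         prefix += char
--
--     plen = len(prefix)
--
--     for node in nodes:
--         if not node.startswith(prefix):
--             raise ValueError('nodes do not have the same prefix: %s' % nodes)
--         if not node[plen:].isdigit():
--             raise ValueError('nodes do not have numeric suffix: %s' % nodes)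
--
--     if len(nodes) == 1:
--         return nodes[0]
--
--     # walk the suffix list, carving out each maximal run of consecutive
--     # integer values as a whole, then emitting it as one part
--     parts = []
--     rest  = [node[plen:] for node in nodes]
--     while rest:
--         first, tail = rest[0], rest[1:]
--         if tail and int(tail[0]) == int(first) + 1:
--             last, tail = tail[0], tail[1:]
--             while tail and int(tail[0]) == int(last) + 1:
--                 last, tail = tail[0], tail[1:]
--             parts.append('%s-%s' % (first, last))
--         else:
--             parts.append(first)
--         rest = tail
--
--     return '%s[%s]' % (prefix, ','.join(parts))
-- ===== Notes on version B (the rewrite author's own statement) =====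
-- stated objective: alternative
-- what changed: A's single-pass state machine with optional start/end registers and deferred flushes is replaced by a loop that carves each maximal run of consecutive integer suffixes out of the suffix list with an inner scan and emits its part immediately; prefix extraction and validation are unchanged.
import Mathlib
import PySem

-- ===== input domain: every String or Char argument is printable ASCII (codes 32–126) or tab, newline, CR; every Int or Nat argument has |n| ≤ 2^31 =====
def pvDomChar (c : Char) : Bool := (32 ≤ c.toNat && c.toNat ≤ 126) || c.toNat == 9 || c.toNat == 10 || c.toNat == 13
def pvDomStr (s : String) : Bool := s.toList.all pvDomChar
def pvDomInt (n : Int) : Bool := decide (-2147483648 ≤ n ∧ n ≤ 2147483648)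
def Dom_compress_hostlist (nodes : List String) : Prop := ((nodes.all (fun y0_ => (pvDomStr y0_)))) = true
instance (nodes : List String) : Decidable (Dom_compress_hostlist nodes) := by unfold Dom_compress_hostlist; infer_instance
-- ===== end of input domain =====

-- B replaces A's start/end option-state machine by a loop that carves out each maximal
-- run of consecutive integer suffixes in one inner scan (objective: alternative, same cost).
-- Equivalence is about the RETURN value; neither program mutates its argument.

-- ===== PORT A =====

-- int(s); under Pre_ the argument is a nonempty all-digit string, so the parse succeeds
-- and the default 0 is never used
def pvIntD (cs : List Char) : Int := (PySem.Int.ofChars? cs).getD 0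

-- 'for char in nodes[0]: if char.isdigit(): break; prefix += char'
def pvPrefix : List Char → List Char
  | [] => []
  | c :: cs => if PySem.Chars.isdigit c then [] else c :: pvPrefix cs

-- node[plen:]
def pvSfx (plen : Int) (node : List Char) : List Char := PySem.List.slice node (some plen) none

-- one iteration of A's range-building loop; state = (ranges, start, end).
-- Python's falsy test 'if not start' is 'none or empty string'.
def pvStepA (plen : Int) (st : List (List Char) × Option (List Char) × Option (List Char))
    (node : List Char) : List (List Char) × Option (List Char) × Option (List Char) :=
  let ranges := st.1
  let ostart := st.2.1
  let oend   := st.2.2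
  let node_idx := pvIntD (pvSfx plen node)
  match ostart with
  | none => (ranges, some node, oend)
  | some s =>
    if s.isEmpty then (ranges, some node, oend)
    else
      let start_idx := pvIntD (pvSfx plen s)
      match oend with
      | none =>
        if node_idx = start_idx + 1 then (ranges, some s, some node)
        else (ranges ++ [pvSfx plen s], some node, none)
      | some e =>
        if e.isEmpty then
          (if node_idx = start_idx + 1 then (ranges, some s, some node)
           else (ranges ++ [pvSfx plen s], some node, some e))
        else
          let end_idx := pvIntD (pvSfx plen e)
          if node_idx = end_idx + 1 then (ranges, some s, some node)
          else (ranges ++ [pvSfx plen s ++ '-' :: pvSfx plen e], some node, none)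

-- A's trailing 'if start: if end: append range else: append start'
def pvFinalA (plen : Int) (st : List (List Char) × Option (List Char) × Option (List Char)) :
    List (List Char) :=
  match st.2.1 with
  | none => st.1
  | some s =>
    if s.isEmpty then st.1
    else
      match st.2.2 with
      | none => st.1 ++ [pvSfx plen s]
      | some e =>
        if e.isEmpty then st.1 ++ [pvSfx plen s]
        else st.1 ++ [pvSfx plen s ++ '-' :: pvSfx plen e]

-- the validation loop raises (ValueError) outside Pre_; the port returns the
-- normal-path value, Pre_ excludes exactly the raising inputs
def compress_hostlist (nodes : List String) : String :=
  if nodes = [] then ""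
  else
    let nodesS := PySem.List.sorted nodes (fun x => x) false
    let ns : List (List Char) := nodesS.map String.toList
    let pfx := pvPrefix (ns.headD [])
    let plen : Int := PySem.List.len pfx
    if PySem.List.len nodesS = 1 then nodesS.headD ""
    else
      let ranges := pvFinalA plen (ns.foldl (pvStepA plen) ([], none, none))
      String.ofList (pfx ++ '[' :: PySem.Chars.join [','] ranges ++ [']'])

-- ===== PORT B =====

-- inner while loop of Source B: extend the run as long as the next suffix parses to last+1;
-- returns (last suffix of the run, unconsumed rest)
def pvExtend (last : List Char) : List (List Char) → List Char × List (List Char)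
  | [] => (last, [])
  | x :: xs => if pvIntD x = pvIntD last + 1 then pvExtend x xs else (last, x :: xs)

theorem pvExtend_length_le (last : List Char) (l : List (List Char)) :
    (pvExtend last l).2.length ≤ l.length := by
  induction l generalizing last with
  | nil => simp [pvExtend]
  | cons x xs ih =>
    simp only [pvExtend]
    split
    · exact (ih x).trans (Nat.le_succ _)
    · simp

-- outer while loop of Source B over the suffix list
def pvParts : List (List Char) → List (List Char)
  | [] => []
  | first :: tail =>
    match tail with
    | [] => [first]
    | x :: xs =>
      if pvIntD x = pvIntD first + 1 then
        let r := pvExtend x xs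
        (first ++ '-' :: r.1) :: pvParts r.2
      else first :: pvParts (x :: xs)
  termination_by l => l.length
  decreasing_by
  · have := pvExtend_length_le x xs; simp; omega
  · simp

def compress_hostlist_alt (nodes : List String) : String :=
  if nodes = [] then ""
  else
    let nodesS := PySem.List.sorted nodes (fun x => x) false
    let ns : List (List Char) := nodesS.map String.toList
    let pfx := pvPrefix (ns.headD [])
    let plen : Int := PySem.List.len pfx
    if PySem.List.len nodesS = 1 then nodesS.headD ""
    else
      let suffixes := ns.map (pvSfx plen)
      String.ofList (pfx ++ '[' :: PySem.Chars.join [','] (pvParts suffixes) ++ [']'])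

-- ===== PRECONDITION & SPEC =====

-- the shared prefix: leading non-digit characters of the first node (when Pre_ holds every
-- node is this prefix plus digits, so this equals the prefix A extracts from the smallest node)
def pvHlPrefix (nodes : List String) : List Char :=
  ((nodes.headD "").toList).takeWhile (fun c => !PySem.Chars.isdigit c)

-- Pre_ excludes exactly the inputs on which A raises ValueError: some node does not start
-- with the extracted prefix, or its remainder after the prefix is not a nonempty digit string.
def Pre_compress_hostlist (nodes : List String) : Prop :=
  nodes = [] ∨
    ∀ node ∈ nodes,
      (pvHlPrefix nodes) <+: node.toList ∧
      PySem.Chars.strIsdigit (node.toList.drop (pvHlPrefix nodes).length) = true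

instance (nodes : List String) : Decidable (Pre_compress_hostlist nodes) := by
  unfold Pre_compress_hostlist; infer_instance

def pvWitness_compress_hostlist : List String := ["node01", "node02", "node04"]

def Spec_compress_hostlist (nodes : List String) (out : String) : Prop :=
  out = compress_hostlist_alt nodes
instance (nodes : List String) (out : String) : Decidable (Spec_compress_hostlist nodes out) := by
  unfold Spec_compress_hostlist; infer_instance

-- ===== CLAIM (what is proved, stated in full; the proofs are below) =====
def Claim_equal_compress_hostlist : Prop :=
  ∀ (nodes : List String), Dom_compress_hostlist nodes → Pre_compress_hostlist nodes →
    Spec_compress_hostlist nodes (compress_hostlist nodes)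

-- ===== LEMMAS AND PROOFS =====

-- what pvParts produces from an open run: start 'first', current end 'last', rest 'ss'
def pvPartsCont (first last : List Char) (ss : List (List Char)) : List (List Char) :=
  let r := pvExtend last ss
  (first ++ '-' :: r.1) :: pvParts r.2

-- A's state machine, run to the end and finalized, produces exactly B's parts
theorem pvMachine_eq (plen : Int) (l : List (List Char)) (H : ∀ n ∈ l, n ≠ []) :
    (∀ ranges s, s ≠ [] →
      pvFinalA plen (l.foldl (pvStepA plen) (ranges, some s, none))
        = ranges ++ pvParts (pvSfx plen s :: l.map (pvSfx plen)))
    ∧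
    (∀ ranges s e, s ≠ [] → e ≠ [] →
      pvFinalA plen (l.foldl (pvStepA plen) (ranges, some s, some e))
        = ranges ++ pvPartsCont (pvSfx plen s) (pvSfx plen e) (l.map (pvSfx plen))) := by
  induction l with
  | nil =>
    constructor
    · intro ranges s hs
      simp [pvFinalA, pvParts, List.isEmpty_iff, hs]
    · intro ranges s e hs he
      simp [pvFinalA, pvPartsCont, pvExtend, pvParts, List.isEmpty_iff, hs, he]
  | cons n rest ih =>
    have hn : n ≠ [] := H n (by simp)
    have ih' := ih (fun m hm => H m (by simp [hm]))
    constructor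
    · intro ranges s hs
      simp only [List.foldl_cons, List.map_cons]
      by_cases hc : pvIntD (pvSfx plen n) = pvIntD (pvSfx plen s) + 1
      · rw [show pvStepA plen (ranges, some s, none) n = (ranges, some s, some n) by
          simp [pvStepA, List.isEmpty_iff, hs, hc]]
        rw [ih'.2 ranges s n hs hn]
        rw [show pvParts (pvSfx plen s :: pvSfx plen n :: rest.map (pvSfx plen))
            = pvPartsCont (pvSfx plen s) (pvSfx plen n) (rest.map (pvSfx plen)) by
          simp [pvParts, pvPartsCont, hc]]
      · rw [show pvStepA plen (ranges, some s, none) n = (ranges ++ [pvSfx plen s], some n, none) by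
          simp [pvStepA, List.isEmpty_iff, hs, hc]]
        rw [ih'.1 (ranges ++ [pvSfx plen s]) n hn]
        rw [show pvParts (pvSfx plen s :: pvSfx plen n :: rest.map (pvSfx plen))
            = pvSfx plen s :: pvParts (pvSfx plen n :: rest.map (pvSfx plen)) by
          simp [pvParts, hc]]
        simp
    · intro ranges s e hs he
      simp only [List.foldl_cons, List.map_cons]
      by_cases hc : pvIntD (pvSfx plen n) = pvIntD (pvSfx plen e) + 1
      · rw [show pvStepA plen (ranges, some s, some e) n = (ranges, some s, some n) by
          simp [pvStepA, List.isEmpty_iff, hs, he, hc]]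
        rw [ih'.2 ranges s n hs hn]
        rw [show pvPartsCont (pvSfx plen s) (pvSfx plen e) (pvSfx plen n :: rest.map (pvSfx plen))
            = pvPartsCont (pvSfx plen s) (pvSfx plen n) (rest.map (pvSfx plen)) by
          simp [pvPartsCont, pvExtend, hc]]
      · rw [show pvStepA plen (ranges, some s, some e) n
            = (ranges ++ [pvSfx plen s ++ '-' :: pvSfx plen e], some n, none) by
          simp [pvStepA, List.isEmpty_iff, hs, he, hc]]
        rw [ih'.1 (ranges ++ [pvSfx plen s ++ '-' :: pvSfx plen e]) n hn]
        rw [show pvPartsCont (pvSfx plen s) (pvSfx plen e) (pvSfx plen n :: rest.map (pvSfx plen))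
            = (pvSfx plen s ++ '-' :: pvSfx plen e) :: pvParts (pvSfx plen n :: rest.map (pvSfx plen)) by
          simp [pvPartsCont, pvExtend, hc]]
        simp

-- under Pre_, every node is a nonempty string
theorem pv_nodes_nonempty (nodes : List String) (h : Pre_compress_hostlist nodes)
    (node : String) (hm : node ∈ nodes) : node.toList ≠ [] := by
  rcases h with h | h
  · subst h; simp at hm
  · rcases h node hm with ⟨-, hd⟩
    intro hnil
    rw [hnil] at hd
    simp [PySem.Chars.strIsdigit] at hd

-- ===== VERDICT (by name: the statement is the Claim_ definition above) =====
theorem compress_hostlist_spec : Claim_equal_compress_hostlist := by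
  intro nodes _ hpre
  unfold Spec_compress_hostlist compress_hostlist compress_hostlist_alt
  by_cases hnil : nodes = []
  · simp [hnil]
  · simp only [if_neg hnil]
    set nodesS := PySem.List.sorted nodes (fun x => x) false with hS
    by_cases hone : nodesS.length = 1
    · simp [hone]
    · simp only [PySem.List.len_eq]
      have hSne : nodesS ≠ [] := by
        intro h
        exact hnil ((PySem.List.sorted_eq_nil_iff nodes (fun x => x) false).mp (hS ▸ h))
      obtain ⟨m0, mrest, hcons⟩ := List.exists_cons_of_ne_nil hSne
      have hmem : ∀ s ∈ nodesS, s ∈ nodes := by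
        intro s hsm
        exact (PySem.List.mem_sorted nodes (fun x => x) false s).mp (hS ▸ hsm)
      have hne : ∀ n ∈ nodesS.map String.toList, n ≠ [] := by
        intro n hn
        obtain ⟨s, hsm, rfl⟩ := List.mem_map.mp hn
        exact pv_nodes_nonempty nodes hpre s (hmem s hsm)
      rw [hcons]
      simp only [List.map_cons, List.foldl_cons]
      rw [show ∀ pl, pvStepA pl ([], none, none) m0.toList = ([], some m0.toList, none) from
        fun pl => by simp [pvStepA]]
      rw [(pvMachine_eq _ (mrest.map String.toList)
            (fun n hn => hne n (by rw [hcons]; simp [hn]))).1 [] m0.toList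
            (hne m0.toList (by rw [hcons]; simp))]
      simp
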